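-- pv_equiv track=rewrite | github.com/lollounicam/Codice-Fiscale- | utils.py | cognome_to_cf
-- ===== SOURCE A (Python) =====
-- def cognome_to_cf(nome):
--     array = []
--     nome = nome.upper()
--     cons = 0
--     if len(nome) >= 3:
--         for char in nome:
--             if char not in "AEIOU":
--                 cons += 1
--         if cons >= 3:
--             for char in nome:
--                 if char not in "AEIOU":
--                     array.append(char)
--             nome_cf = array[0] + array[1] + array[2]
--         elif cons == 2 or cons == 1:
--             for char in nome:
--                 if char not in "AEIOU":
--                         array.append(char)
--             for char in nome:
--                 if char in "AEIOU" and len(array) < 3: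
--                     array.append(char)
--             nome_cf = array[0] + array[1] + array[2]
--         else:
--             for char in nome:
--                 array.append(char)
--             nome_cf = array[0] + array[1] + array[2]
--     match len(nome):
--         case 2:
--             nome_cf = nome[0] + nome[1] + "X"
--         case 1:
--             nome_cf = nome[0] + "XX"
--     return nome_cf
-- ===== SOURCE B (Python) =====
-- def cognome_to_cf(nome):
--     nome = nome.upper()
--     if len(nome) == 2:
--         return nome[0] + nome[1] + "X"
--     if len(nome) == 1:
--         return nome[0] + "XX"
--     # single pass, bounded 3-slot buffer: consonants are kept before the vowels
--     # already buffered; when the buffer overflows, the latest vowel is dropped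
--     buf = []
--     nv = 0  # how many vowels are currently in buf (they sit at its tail)
--     for ch in nome:
--         if ch in "AEIOU":
--             if len(buf) < 3:
--                 buf.append(ch)
--                 nv += 1
--         elif nv == 0:
--             if len(buf) < 3:
--                 buf.append(ch)
--         else:
--             buf.insert(len(buf) - nv, ch)
--             if len(buf) > 3:
--                 buf.pop()
--                 nv -= 1
--     return buf[0] + buf[1] + buf[2]
-- ===== Notes on version B (the rewrite author's own statement) =====
-- stated objective: alternative
-- what changed: Replaces A's count-consonants pass plus three separate append-loop branches by a single left-to-right pass maintaining a bounded 3-slot buffer into which consonants are inserted ahead of buffered vowels, dropping the latest vowel on overflow.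
import Mathlib
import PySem

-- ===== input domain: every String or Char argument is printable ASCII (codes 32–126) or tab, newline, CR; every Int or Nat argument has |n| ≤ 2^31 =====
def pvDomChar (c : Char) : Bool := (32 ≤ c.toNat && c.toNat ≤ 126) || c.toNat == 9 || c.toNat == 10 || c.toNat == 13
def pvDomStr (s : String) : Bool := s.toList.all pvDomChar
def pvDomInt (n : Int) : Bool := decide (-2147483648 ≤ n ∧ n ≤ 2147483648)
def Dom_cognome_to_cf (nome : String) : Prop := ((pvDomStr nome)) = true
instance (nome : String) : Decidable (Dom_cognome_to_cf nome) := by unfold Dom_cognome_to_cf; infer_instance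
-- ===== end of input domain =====

-- B replaces A's count-then-branch multi-pass construction by one left-to-right pass over the
-- name keeping a bounded 3-slot buffer (consonants inserted ahead of buffered vowels,
-- overflow dropping the latest vowel); objective: alternative single-pass algorithm.

-- shared rendering of Python's `char in "AEIOU"`
def pvVow (c : Char) : Bool := "AEIOU".toList.contains c

-- ===== PORT A =====
def cognome_to_cf (nome : String) : String :=
  let l := (PySem.Str.upper nome).toList
  let cons : Int := l.foldl (fun n c => if !(pvVow c) then n + 1 else n) 0
  -- the `""` default stands for Python's unassigned `nome_cf`; it is read only when len(nome) = 0,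
  -- where Python raises UnboundLocalError (excluded by Pre_)
  let nome_cf : String :=
    if 3 ≤ l.length then
      if 3 ≤ cons then
        let array := l.foldl (fun a c => if !(pvVow c) then a ++ [c] else a) []
        String.mk [PySem.List.pyGetD array 0 ' ', PySem.List.pyGetD array 1 ' ',
                   PySem.List.pyGetD array 2 ' ']
      else if cons = 2 ∨ cons = 1 then
        let array := l.foldl (fun a c => if !(pvVow c) then a ++ [c] else a) ([] : List Char)
        let array := l.foldl (fun a c => if pvVow c ∧ a.length < 3 then a ++ [c] else a) array
        String.mk [PySem.List.pyGetD array 0 ' ', PySem.List.pyGetD array 1 ' ',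
                   PySem.List.pyGetD array 2 ' ']
      else
        let array := l.foldl (fun a c => a ++ [c]) ([] : List Char)
        String.mk [PySem.List.pyGetD array 0 ' ', PySem.List.pyGetD array 1 ' ',
                   PySem.List.pyGetD array 2 ' ']
    else ""
  -- Python's `match len(nome):` with cases 2 and 1
  if l.length = 2 then
    String.mk [PySem.List.pyGetD l 0 ' ', PySem.List.pyGetD l 1 ' ', 'X']
  else if l.length = 1 then
    String.mk [PySem.List.pyGetD l 0 ' ', 'X', 'X']
  else nome_cf

-- ===== PORT B =====
-- one iteration of Source B's loop body over the state (buf, nv)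
def pvStep (s : List Char × Nat) (c : Char) : List Char × Nat :=
  if pvVow c then
    if s.1.length < 3 then (s.1 ++ [c], s.2 + 1) else s
  else if s.2 = 0 then
    if s.1.length < 3 then (s.1 ++ [c], s.2) else s
  else
    -- buf.insert(len(buf) - nv, ch); Python list.insert with an in-range index
    let buf' := PySem.List.insert s.1 ((s.1.length : Int) - (s.2 : Int)) c
    if 3 < buf'.length then
      -- buf.pop(): buf' is nonempty here, so pop? is always `some`
      (((PySem.List.pop? buf').map Prod.snd).getD buf', s.2 - 1)
    else (buf', s.2)

def cognome_to_cf_alt (nome : String) : String :=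
  let u := (PySem.Str.upper nome).toList
  if u.length = 2 then
    String.mk [PySem.List.pyGetD u 0 ' ', PySem.List.pyGetD u 1 ' ', 'X']
  else if u.length = 1 then
    String.mk [PySem.List.pyGetD u 0 ' ', 'X', 'X']
  else
    let st := u.foldl pvStep ([], 0)
    -- buf[0] + buf[1] + buf[2]; on "" Source B raises IndexError (excluded by Pre_)
    String.mk [PySem.List.pyGetD st.1 0 ' ', PySem.List.pyGetD st.1 1 ' ',
               PySem.List.pyGetD st.1 2 ' ']

-- ===== PRECONDITION & SPEC =====
-- Pre_ excludes only the empty string, on which A raises UnboundLocalError (and Source B IndexError).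
def Pre_cognome_to_cf (nome : String) : Prop := nome ≠ ""
instance (nome : String) : Decidable (Pre_cognome_to_cf nome) := by
  unfold Pre_cognome_to_cf; infer_instance
def pvWitness_cognome_to_cf : String := "Rossi"

def Spec_cognome_to_cf (nome : String) (out : String) : Prop := out = cognome_to_cf_alt nome
instance (nome : String) (out : String) : Decidable (Spec_cognome_to_cf nome out) := by
  unfold Spec_cognome_to_cf; infer_instance

-- ===== CLAIM (what is proved, stated in full; the proofs are below) =====
def Claim_equal_cognome_to_cf : Prop := ∀ (nome : String), Dom_cognome_to_cf nome → Pre_cognome_to_cf nome → Spec_cognome_to_cf nome (cognome_to_cf nome)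

-- ===== LEMMAS AND PROOFS =====

-- invariant of B's single pass: the buffer holds the first three of consonants-then-vowels,
-- nv the number of buffered vowels
lemma pv_inv (l : List Char) :
    l.foldl pvStep ([], 0) =
      (((l.filter (fun c => !pvVow c)) ++ (l.filter (fun c => pvVow c))).take 3,
       min (l.filter (fun c => pvVow c)).length (3 - (l.filter (fun c => !pvVow c)).length)) := by
  induction l using List.reverseRecOn with
  | nil => simp
  | append_singleton l c ih =>
    rw [List.foldl_append, ih]
    set C := l.filter (fun c => !pvVow c) with hC
    set V := l.filter (fun c => pvVow c) with hV
    simp only [List.foldl_cons, List.foldl_nil, List.filter_append, List.filter_cons,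
      List.filter_nil, ← hC, ← hV]
    by_cases hv : pvVow c
    · -- vowel case
      simp only [pvStep, hv, Bool.not_true, Bool.false_eq_true, if_false, if_true,
        List.append_nil, List.length_take]
      by_cases hlt : min 3 (C ++ V).length < 3
      · rw [if_pos hlt]
        have hsm : (C ++ V).length < 3 := by simpa using hlt
        rw [List.length_append] at hsm
        have : (C ++ V).take 3 = C ++ V := List.take_of_length_le (by simp; omega)
        rw [this]
        simp only [Prod.mk.injEq]
        refine ⟨?_, ?_⟩
        · rw [List.append_assoc, List.take_of_length_le (by simp; omega)]
        · simp; omega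
      · rw [if_neg hlt]
        have hsm : 3 ≤ (C ++ V).length := by
          by_contra h; exact hlt (by simp; omega)
        rw [List.length_append] at hsm
        simp only [Prod.mk.injEq]
        refine ⟨?_, ?_⟩
        · rw [List.take_append, List.take_append]
          congr 1
          by_cases hC3 : 3 ≤ C.length
          · simp [Nat.sub_eq_zero_of_le hC3]
          · rw [List.take_append_of_le_length (by omega)]
        · simp; omega
    · -- consonant case
      simp only [pvStep, hv, Bool.not_false, Bool.false_eq_true, if_false, if_true,
        List.append_nil, List.length_take]
      by_cases hnv : min V.length (3 - C.length) = 0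
      · -- no vowels buffered: plain conditional append of the consonant
        rw [if_pos hnv]
        by_cases hlt : min 3 (C ++ V).length < 3
        · rw [if_pos hlt]
          have hsm : (C ++ V).length < 3 := by simpa using hlt
          rw [List.length_append] at hsm
          have hV0 : V.length = 0 := by omega
          have hVnil : V = [] := List.eq_nil_of_length_eq_zero hV0
          rw [hVnil]
          have h1 : (C ++ ([] : List Char)).take 3 = C := by
            rw [List.append_nil, List.take_of_length_le (by omega)]
          rw [h1]
          simp only [Prod.mk.injEq]
          refine ⟨?_, ?_⟩
          · rw [List.append_nil, List.take_of_length_le (by simp; omega)]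
          · simp
        · rw [if_neg hlt]
          have hsm : 3 ≤ (C ++ V).length := by
            by_contra h; exact hlt (by simp; omega)
          rw [List.length_append] at hsm
          -- nv = 0 with 3 ≤ |C|+|V| forces V = [] or 3 ≤ |C|
          rcases (by omega : V.length = 0 ∨ 3 ≤ C.length) with h0 | h3
          · have hVnil : V = [] := List.eq_nil_of_length_eq_zero h0
            rw [hVnil]
            have h3C : 3 ≤ C.length := by omega
            simp only [Prod.mk.injEq]
            refine ⟨?_, ?_⟩
            · rw [List.append_nil, List.append_nil,
                List.take_append_of_le_length (by omega)]
            · simp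
          · simp only [Prod.mk.injEq]
            refine ⟨?_, ?_⟩
            · rw [List.take_append_of_le_length (by omega),
                List.take_append_of_le_length (by simp; omega),
                List.take_append_of_le_length (by omega)]
            · simp; omega
      · -- vowels buffered: insert before them, drop the last on overflow
        rw [if_neg hnv]
        have hVpos : 0 < V.length := by omega
        have hC3 : C.length < 3 := by omega
        set nv := min V.length (3 - C.length) with hnvdef
        have hbuf : (C ++ V).take 3 = C ++ V.take (3 - C.length) := by
          rw [List.take_append, List.take_of_length_le (by omega)]
        have hbuflen : ((C ++ V).take 3).length = C.length + nv := by
          rw [hbuf]; simp [hnvdef]; omega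
        have hmin3 : min 3 (C ++ V).length = C.length + nv := by
          have := hbuflen; rw [List.length_take] at this; exact this
        have hidx : (((min 3 (C ++ V).length : Nat) : Int) - ((nv : Nat) : Int))
            = ((C.length : Nat) : Int) := by
          rw [hmin3]; push_cast; ring
        rw [hidx, PySem.List.insert_natCast _ _ _ (by rw [hbuflen]; omega)]
        rw [hbuf, List.take_append_of_le_length (le_refl _),
          List.take_of_length_le (le_refl _),
          List.drop_append_of_le_length (le_refl _), List.drop_of_length_le (le_refl _),
          List.nil_append]
        by_cases hover : 3 < (C ++ c :: V.take (3 - C.length)).length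
        · rw [if_pos hover]
          -- overflow: nv was 3 - C.length and the popped element is the last buffered vowel
          have hfull : nv = 3 - C.length := by
            rw [List.length_append, List.length_cons, List.length_take] at hover
            omega
          have hVge : 3 - C.length ≤ V.length := by omega
          set k := 3 - C.length with hk
          have hkpos : 0 < k := by omega
          have htk : V.take k = V.take (k - 1) ++ [V[k-1]'(by omega)] := by
            conv_lhs => rw [show k = (k-1)+1 by omega]
            rw [List.take_succ, List.getElem?_eq_getElem (by omega)]
            simp
          rw [htk, show C ++ c :: (V.take (k-1) ++ [V[k-1]'(by omega)])
                = (C ++ c :: V.take (k-1)) ++ [V[k-1]'(by omega)] by simp,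
            PySem.List.pop?_last]
          simp only [Option.map_some, Option.getD_some, Prod.mk.injEq]
          refine ⟨?_, ?_⟩
          · rw [List.take_append,
              List.take_of_length_le (show (C ++ [c]).length ≤ 3 by simp; omega)]
            have e : 3 - (C ++ [c]).length = k - 1 := by simp; omega
            rw [e]
            simp
          · have e : (C ++ [c]).length = C.length + 1 := by simp
            rw [e]
            omega
        · rw [if_neg hover]
          -- no overflow: the whole name so far fits in the buffer
          have hsm : C.length + 1 + min (3 - C.length) V.length ≤ 3 := by
            rw [List.length_append, List.length_cons, List.length_take] at hover
            omega
          have hVsm : V.length < 3 - C.length := by omega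
          have hVt : V.take (3 - C.length) = V := List.take_of_length_le (by omega)
          rw [hVt]
          simp only [Prod.mk.injEq]
          refine ⟨?_, ?_⟩
          · rw [List.take_of_length_le (show (C ++ [c] ++ V).length ≤ 3 by simp; omega),
              List.append_assoc, List.singleton_append]
          · simp; omega

-- first three elements read by pyGetD, as the string of `take 3`
lemma pv_mk_take3 (xs : List Char) (h : 3 ≤ xs.length) :
    String.mk [PySem.List.pyGetD xs 0 ' ', PySem.List.pyGetD xs 1 ' ',
               PySem.List.pyGetD xs 2 ' ']
      = String.mk (xs.take 3) := by
  match xs, h with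
  | a :: b :: c :: t, _ =>
    simp [PySem.List.pyGetD_ofNat', List.getD]

-- the second loop of A's cons∈{1,2} branch: append vowels while the array is shorter than 3
lemma pv_foldl_cap (l : List Char) (a : List Char) :
    l.foldl (fun a c => if pvVow c ∧ a.length < 3 then a ++ [c] else a) a
      = a ++ (l.filter (fun c => pvVow c)).take (3 - a.length) := by
  induction l generalizing a with
  | nil => simp
  | cons c t ih =>
    by_cases hv : pvVow c
    · by_cases hl : a.length < 3
      · rw [List.foldl_cons, if_pos ⟨hv, hl⟩, ih]
        have h3 : 3 - a.length = (3 - (a ++ [c]).length) + 1 := by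
          simp; omega
        rw [h3]
        simp [hv, List.take_succ_cons]
      · have h0 : 3 - a.length = 0 := by omega
        rw [List.foldl_cons, if_neg (by simp [hl]), ih]
        simp [hv, h0]
    · rw [List.foldl_cons, if_neg (by simp [hv]), ih]
      simp [hv]

lemma pv_foldl_append_id (l : List Char) (a : List Char) :
    l.foldl (fun a c => a ++ [c]) a = a ++ l := by
  induction l generalizing a with
  | nil => simp
  | cons c t ih => simp [List.foldl_cons, ih]

lemma pv_filter_length_sum (l : List Char) (p : Char → Bool) :
    (l.filter p).length + (l.filter (fun c => !p c)).length = l.length := by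
  induction l with
  | nil => simp
  | cons c t ih =>
    by_cases h : p c
    · simp [h]; omega
    · simp [h]; omega

-- A's value for names of length ≥ 3: the first three of consonants-then-vowels
lemma pv_A_long (l : List Char) (h3 : 3 ≤ l.length) :
    (if 3 ≤ l.length then
      if 3 ≤ (l.foldl (fun n c => if !(pvVow c) then n + 1 else n) (0 : Int)) then
        let array := l.foldl (fun a c => if !(pvVow c) then a ++ [c] else a) []
        String.mk [PySem.List.pyGetD array 0 ' ', PySem.List.pyGetD array 1 ' ',
                   PySem.List.pyGetD array 2 ' ']
      else if (l.foldl (fun n c => if !(pvVow c) then n + 1 else n) (0 : Int)) = 2 ∨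
              (l.foldl (fun n c => if !(pvVow c) then n + 1 else n) (0 : Int)) = 1 then
        let array := l.foldl (fun a c => if !(pvVow c) then a ++ [c] else a) ([] : List Char)
        let array := l.foldl (fun a c => if pvVow c ∧ a.length < 3 then a ++ [c] else a) array
        String.mk [PySem.List.pyGetD array 0 ' ', PySem.List.pyGetD array 1 ' ',
                   PySem.List.pyGetD array 2 ' ']
      else
        let array := l.foldl (fun a c => a ++ [c]) ([] : List Char)
        String.mk [PySem.List.pyGetD array 0 ' ', PySem.List.pyGetD array 1 ' ',
                   PySem.List.pyGetD array 2 ' ']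
    else "")
    = String.mk (((l.filter (fun c => !pvVow c)) ++ (l.filter (fun c => pvVow c))).take 3) := by
  simp only [PySem.List.foldl_if_add_one, PySem.List.foldl_append_if_eq_filter,
    pv_foldl_cap, pv_foldl_append_id, List.nil_append, zero_add, if_pos h3]
  set C := l.filter (fun c => !pvVow c) with hCdef
  set V := l.filter (fun c => pvVow c) with hVdef
  have hCl : C.length = l.countP (fun c => !pvVow c) := by
    rw [hCdef, List.countP_eq_length_filter]
  have hsum : V.length + C.length = l.length := by
    rw [hCdef, hVdef]; simpa using pv_filter_length_sum l (fun c => pvVow c)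
  set k := l.countP (fun c => !pvVow c) with hkdef
  by_cases hk3 : 3 ≤ (k : Int)
  · rw [if_pos hk3, pv_mk_take3 C (by omega),
      List.take_append_of_le_length (by omega)]
  · rw [if_neg hk3]
    by_cases hk21 : (k : Int) = 2 ∨ (k : Int) = 1
    · rw [if_pos hk21]
      have hk2 : k ≤ 2 := by omega
      rw [pv_mk_take3 _ (by simp [List.length_take]; omega)]
      congr 1
      rw [List.take_append, List.take_append, List.take_take,
        List.take_of_length_le (by omega), hCl]
      simp
    · rw [if_neg hk21]
      have hk0 : k = 0 := by omega
      have hallv : ∀ c ∈ l, pvVow c = true := by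
        intro c hc
        have hc0 : l.countP (fun c => !pvVow c) = 0 := by rw [← hkdef]; exact hk0
        have := List.countP_eq_zero.mp hc0 c hc
        simpa using this
      have hC : C = [] := by
        rw [hCdef]; exact List.filter_eq_nil_iff.mpr (by intro c hc; simp [hallv c hc])
      have hV : V = l := by
        rw [hVdef]; exact List.filter_eq_self.mpr hallv
      rw [pv_mk_take3 l (by omega), hC, hV, List.nil_append]

-- ===== VERDICT (by name: the statement is the Claim_ definition above) =====
set_option maxHeartbeats 1000000 in
theorem cognome_to_cf_spec : Claim_equal_cognome_to_cf := by
  intro nome _ hpre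
  have hne : nome.toList ≠ [] := by
    intro hn; apply hpre; exact String.toList_inj.mp (by simp [hn])
  unfold Spec_cognome_to_cf cognome_to_cf cognome_to_cf_alt
  set l := (PySem.Str.upper nome).toList with hldef
  have hlen : l.length = nome.toList.length := by
    rw [hldef, PySem.Str.toList_upper]; simp [PySem.Chars.upper]
  have hpos : 0 < l.length := by
    rw [hlen]; exact List.length_pos_iff.mpr hne
  rcases (by omega : l.length = 1 ∨ l.length = 2 ∨ 3 ≤ l.length) with h1 | h2 | h3
  · simp [h1]
  · simp [h2]
  · have hn2 : ¬ l.length = 2 := by omega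
    have hn1 : ¬ l.length = 1 := by omega
    simp only [if_neg hn2, if_neg hn1]
    rw [pv_A_long l h3, pv_inv l]
    set T := ((l.filter (fun c => !pvVow c)) ++ (l.filter (fun c => pvVow c))).take 3 with hT
    have hTlen : 3 ≤ T.length := by
      rw [hT, List.length_take, List.length_append]
      have hsum : (l.filter (fun c => pvVow c)).length
          + (l.filter (fun c => !pvVow c)).length = l.length := by
        simpa using pv_filter_length_sum l (fun c => pvVow c)
      omega
    rw [pv_mk_take3 T hTlen, List.take_of_length_le (by rw [hT]; exact List.length_take_le ..)]
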